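-- pv_equiv track=rewrite | github.com/hiteshwar21m/rag-chatbot | src/chunking/chunking_pipeline.py | detect_table_boundaries
-- ===== SOURCE A (Python) =====
-- from typing import List, Dict, Optional, Tuple
--
-- def detect_table_boundaries(text: str) -> List[Tuple[int, int]]:
--     """Detect markdown table boundaries (start, end line numbers)"""
--     lines = text.split('\n')
--     tables = []
--     in_table = False
--     table_start = 0
--
--     for i, line in enumerate(lines):
--         # Markdown table line contains |
--         is_table_line = '|' in line and line.strip().startswith('|')
--
--         if is_table_line and not in_table:
--             in_table = True
--             table_start = i
--         elif not is_table_line and in_table: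
--             in_table = False
--             tables.append((table_start, i - 1))
--
--     # Handle table at end of file
--     if in_table:
--         tables.append((table_start, len(lines) - 1))
--
--     return tables
-- ===== SOURCE B (Python) =====
-- def detect_table_boundaries(text):
--     """Detect markdown table boundaries (start, end line numbers)"""
--     flags = ['|' in line and line.strip().startswith('|')
--              for line in text.split('\n')]
--     tables = []
--     i = 0
--     while i < len(flags):
--         if flags[i]:
--             j = i
--             while j + 1 < len(flags) and flags[j + 1]:
--                 j += 1
--             tables.append((i, j))
--             i = j + 1
--         else:
--             i += 1
--     return tables
-- ===== Notes on version B (the rewrite author's own statement) =====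
-- stated objective: simpler
-- what changed: Replaced A's in_table/table_start state machine with its separate end-of-file flush by a two-phase approach: classify every line into a boolean flag first, then scan the flag list emitting each maximal run of consecutive table lines as one (start, end) pair, so the final run needs no special flush.
import Mathlib
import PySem

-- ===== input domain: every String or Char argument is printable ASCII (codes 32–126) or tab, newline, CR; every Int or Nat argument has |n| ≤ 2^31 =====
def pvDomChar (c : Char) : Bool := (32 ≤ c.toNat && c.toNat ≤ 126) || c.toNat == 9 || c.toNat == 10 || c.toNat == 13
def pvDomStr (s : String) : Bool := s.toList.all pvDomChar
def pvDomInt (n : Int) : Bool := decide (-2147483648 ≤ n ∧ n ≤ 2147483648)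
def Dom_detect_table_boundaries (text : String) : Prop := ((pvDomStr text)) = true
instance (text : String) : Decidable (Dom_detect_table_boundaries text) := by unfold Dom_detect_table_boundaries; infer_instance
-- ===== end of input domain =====

-- B replaces A's in_table/table_start state machine (with its separate end-of-file flush)
-- by classifying every line first and then scanning the flag list run by run (objective: simpler).

-- ===== PORT A =====
def detect_table_boundaries (text : String) : List (Int × Int) :=
  let lines := (PySem.Str.split? text "\n").getD []   -- sep "\n" ≠ "", so split? is never none
  let st := (PySem.List.enumerate lines 0).foldl
    (fun (st : List (Int × Int) × Bool × Int) (p : Int × String) =>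
      let tables := st.1
      let in_table := st.2.1
      let table_start := st.2.2
      let is_table_line := PySem.Str.isIn "|" p.2 && PySem.Str.startswith (PySem.Str.strip p.2) "|"
      if is_table_line && !in_table then (tables, true, p.1)
      else if !is_table_line && in_table then (tables ++ [(table_start, p.1 - 1)], false, table_start)
      else (tables, in_table, table_start))
    ([], false, 0)
  if st.2.1 then st.1 ++ [(st.2.2, PySem.List.len lines - 1)] else st.1

-- ===== PORT B =====
def isTableLine (line : String) : Bool :=
  PySem.Str.isIn "|" line && PySem.Str.startswith (PySem.Str.strip line) "|"

/-- Run scanner over the per-line flags: skip a non-table line, or emit a whole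
maximal run of table lines at once (Source B's inner `while` advancing `j`). -/
def tableRuns (i : Int) : List Bool → List (Int × Int)
  | [] => []
  | false :: rest => tableRuns (i + 1) rest
  | true :: rest =>
      let n := (rest.takeWhile id).length
      (i, i + (n : Int)) :: tableRuns (i + (n : Int) + 1) (rest.drop n)
termination_by bs => bs.length
decreasing_by
  · simp
  · simp only [List.length_cons, List.length_drop]
    omega

def detect_table_boundaries_alt (text : String) : List (Int × Int) :=
  tableRuns 0 (((PySem.Str.split? text "\n").getD []).map isTableLine)

-- ===== PRECONDITION & SPEC =====
def Spec_detect_table_boundaries (text : String) (out : List (Int × Int)) : Prop := out = detect_table_boundaries_alt text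
instance (text : String) (out : List (Int × Int)) : Decidable (Spec_detect_table_boundaries text out) := by unfold Spec_detect_table_boundaries; infer_instance

-- ===== CLAIM (what is proved, stated in full; the proofs are below) =====
def Claim_equal_detect_table_boundaries : Prop := ∀ (text : String), Dom_detect_table_boundaries text → Spec_detect_table_boundaries text (detect_table_boundaries text)

-- ===== LEMMAS AND PROOFS =====

/-- A's loop body, named for the proofs (definitionally A's lambda). -/
def aStep (st : List (Int × Int) × Bool × Int) (p : Int × String) : List (Int × Int) × Bool × Int :=
  if isTableLine p.2 && !st.2.1 then (st.1, true, p.1)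
  else if !(isTableLine p.2) && st.2.1 then (st.1 ++ [(st.2.2, p.1 - 1)], false, st.2.2)
  else st

/-- A's end-of-file flush, named for the proofs. -/
def aFinish (n : Int) (st : List (Int × Int) × Bool × Int) : List (Int × Int) :=
  if st.2.1 then st.1 ++ [(st.2.2, n - 1)] else st.1

/-- Joint loop invariant: A's fold-then-flush from the `in_table = false` state
produces B's run list; from the `in_table = true` state it produces the pending
run `(t, …)` followed by B's run list of the remaining flags. -/
lemma main_invariant (ls : List String) :
    (∀ (i s : Int) (acc : List (Int × Int)),
      aFinish (i + (ls.length : Int)) ((PySem.List.enumerate ls i).foldl aStep (acc, false, s))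
        = acc ++ tableRuns i (ls.map isTableLine))
    ∧ (∀ (i t : Int) (acc : List (Int × Int)),
      aFinish (i + (ls.length : Int)) ((PySem.List.enumerate ls i).foldl aStep (acc, true, t))
        = acc ++ (t, i + (((ls.map isTableLine).takeWhile id).length : Int) - 1)
            :: tableRuns (i + (((ls.map isTableLine).takeWhile id).length : Int))
                 ((ls.map isTableLine).drop ((ls.map isTableLine).takeWhile id).length)) := by
  induction ls with
  | nil =>
      refine ⟨fun i s acc => ?_, fun i t acc => ?_⟩ <;>
        simp [PySem.List.enumerate_nil, aFinish, tableRuns]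
  | cons l ls ih =>
      obtain ⟨ih1, ih2⟩ := ih
      have hlen : ∀ i : Int, i + ((l :: ls).length : Int) = (i + 1) + (ls.length : Int) := by
        intro i; simp; ring
      refine ⟨fun i s acc => ?_, fun i t acc => ?_⟩ <;>
        rw [PySem.List.enumerate_cons] <;> by_cases h : isTableLine l
      · -- false-state, table line: enter a table at index i
        simp only [List.foldl_cons, aStep, h]
        simp only [Bool.not_false, Bool.and_true, if_true]
        rw [hlen, ih2 (i + 1) i acc]
        simp only [List.map_cons, tableRuns, List.takeWhile_cons, h, id_eq, if_true]
        have e1 : i + 1 + ((((ls.map isTableLine).takeWhile id).length : Nat) : Int) - 1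
            = i + (((ls.map isTableLine).takeWhile id).length : Int) := by ring
        have e2 : i + 1 + ((((ls.map isTableLine).takeWhile id).length : Nat) : Int)
            = i + (((ls.map isTableLine).takeWhile id).length : Int) + 1 := by ring
        rw [e1, e2]
      · -- false-state, non-table line: stay out
        simp only [List.foldl_cons, aStep, h]
        simp only [Bool.false_and, Bool.and_false, Bool.not_false, Bool.false_eq_true, if_false]
        rw [hlen, ih1 (i + 1) s acc]
        simp only [List.map_cons]
        rw [show isTableLine l = false by simpa using h]
        rw [tableRuns]
      · -- true-state, table line: stay in the run
        simp only [List.foldl_cons, aStep, h]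
        simp only [Bool.not_true, Bool.and_false, Bool.false_and, Bool.false_eq_true, if_false, ite_false]
        rw [hlen, ih2 (i + 1) t acc]
        simp only [List.map_cons, List.takeWhile_cons, h, id_eq, if_true, List.length_cons,
          List.drop_succ_cons]
        have e1 : i + 1 + ((((ls.map isTableLine).takeWhile id).length : Nat) : Int) - 1
            = i + ((((ls.map isTableLine).takeWhile id).length + 1 : Nat) : Int) - 1 := by
          push_cast; ring
        have e2 : i + 1 + ((((ls.map isTableLine).takeWhile id).length : Nat) : Int)
            = i + ((((ls.map isTableLine).takeWhile id).length + 1 : Nat) : Int) := by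
          push_cast; ring
        rw [e1, e2]
      · -- true-state, non-table line: flush (t, i-1), leave the table
        simp only [List.foldl_cons, aStep, h]
        simp only [Bool.false_and, Bool.not_false, Bool.true_and, Bool.false_eq_true, if_false, if_true, ite_false, ite_true]
        rw [hlen, ih1 (i + 1) t (acc ++ [(t, i - 1)])]
        rw [List.map_cons, show isTableLine l = false from by simpa using h]
        simp only [List.takeWhile_cons, id_eq, Bool.false_eq_true, if_false, ite_false,
          List.length_nil, Nat.cast_zero, List.drop_zero, add_zero, List.append_assoc,
          List.singleton_append]
        rw [tableRuns]

-- ===== VERDICT (by name: the statement is the Claim_ definition above) =====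
theorem detect_table_boundaries_spec : Claim_equal_detect_table_boundaries := by
  intro text _
  unfold Spec_detect_table_boundaries detect_table_boundaries detect_table_boundaries_alt
  have h := (main_invariant ((PySem.Str.split? text "\n").getD [])).1 0 0 []
  rw [zero_add] at h
  exact h
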